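-- pv_equiv track=rewrite | github.com/pcmoan70/aibirder_geomodel | scripts/plot_variable_importance.py | _group_order
-- ===== SOURCE A (Python) =====
-- from typing import Dict, List, Optional, Tuple
--
-- PRETTY_NAMES = {
--     'elevation': 'Elevation',
--     'temperature_mean': 'Temperature (mean)',
--     'temperature_range': 'Temperature (range)',
--     'precipitation_mean': 'Precipitation (mean)',
--     'precipitation_range': 'Precipitation (range)',
--     'water_fraction': 'Water fraction',
--     'urban_fraction': 'Urban fraction',
--     'ndvi_mean': 'NDVI (mean)',
--     'ndvi_range': 'NDVI (range)',
-- }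
--
-- def prettify_name(name: str) -> str:
--     """Make a variable name human-readable."""
--     if name in PRETTY_NAMES:
--         return PRETTY_NAMES[name]
--     return name.replace('_', ' ').title()
--
-- VARIABLE_GROUPS = [
--     ('Location',   ['latitude', 'longitude']),
--     ('Climate',    ['temperature', 'precipitation']),
--     ('Terrain',    ['elevation', 'canopy']),
--     ('Surface',    ['water_fraction', 'urban_fraction']),
--     ('Land Cover', ['LC:']),  # one-hot land cover columns start with "LC:"
-- ]
--
-- def _group_order(
--     variable_names: List[str],
-- ) -> List[int]:
--     """
--     Return indices into *variable_names* sorted by semantic group.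
--
--     Variables within each group keep their original order.
--     Any variable that doesn't match a group is appended at the end.
--     """
--     used: set = set()
--     ordered: List[int] = []
--
--     pretty = [prettify_name(n) for n in variable_names]
--
--     for _, prefixes in VARIABLE_GROUPS:
--         for idx, (raw, pn) in enumerate(zip(variable_names, pretty)):
--             if idx in used:
--                 continue
--             for pfx in prefixes:
--                 if raw.startswith(pfx) or pn.startswith(pfx):
--                     ordered.append(idx)
--                     used.add(idx)
--                     break
--
--     # Anything unmatched goes at the end
--     for idx in range(len(variable_names)):
--         if idx not in used:
--             ordered.append(idx)
--
--     return ordered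
-- ===== SOURCE B (Python) =====
-- from typing import Dict, List, Optional, Tuple
--
-- PRETTY_NAMES = {
--     'elevation': 'Elevation',
--     'temperature_mean': 'Temperature (mean)',
--     'temperature_range': 'Temperature (range)',
--     'precipitation_mean': 'Precipitation (mean)',
--     'precipitation_range': 'Precipitation (range)',
--     'water_fraction': 'Water fraction',
--     'urban_fraction': 'Urban fraction',
--     'ndvi_mean': 'NDVI (mean)',
--     'ndvi_range': 'NDVI (range)',
-- }
--
-- def prettify_name(name: str) -> str:
--     """Make a variable name human-readable."""
--     if name in PRETTY_NAMES:
--         return PRETTY_NAMES[name]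
--     return name.replace('_', ' ').title()
--
-- VARIABLE_GROUPS = [
--     ('Location',   ['latitude', 'longitude']),
--     ('Climate',    ['temperature', 'precipitation']),
--     ('Terrain',    ['elevation', 'canopy']),
--     ('Surface',    ['water_fraction', 'urban_fraction']),
--     ('Land Cover', ['LC:']),
-- ]
--
-- def _rank(raw: str) -> int:
--     """Index of the first group whose prefixes match raw or its pretty name; len(VARIABLE_GROUPS) if none."""
--     pn = prettify_name(raw)
--     for g, (_, prefixes) in enumerate(VARIABLE_GROUPS):
--         if any(raw.startswith(p) or pn.startswith(p) for p in prefixes):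
--             return g
--     return len(VARIABLE_GROUPS)
--
-- def _group_order(variable_names: List[str]) -> List[int]:
--     """One pass: drop each index into its group's bucket, then concatenate the buckets."""
--     buckets: List[List[int]] = [[] for _ in range(len(VARIABLE_GROUPS) + 1)]
--     for idx, name in enumerate(variable_names):
--         buckets[_rank(name)].append(idx)
--     return [idx for bucket in buckets for idx in bucket]
-- ===== Notes on version B (the rewrite author's own statement) =====
-- stated objective: alternative
-- what changed: Replaces the group-by-group rescans over a shrinking unmatched pool (used-set) by a single pass that computes each name's group rank once and drops its index into that rank's bucket, then concatenates the buckets.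
import Mathlib
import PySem

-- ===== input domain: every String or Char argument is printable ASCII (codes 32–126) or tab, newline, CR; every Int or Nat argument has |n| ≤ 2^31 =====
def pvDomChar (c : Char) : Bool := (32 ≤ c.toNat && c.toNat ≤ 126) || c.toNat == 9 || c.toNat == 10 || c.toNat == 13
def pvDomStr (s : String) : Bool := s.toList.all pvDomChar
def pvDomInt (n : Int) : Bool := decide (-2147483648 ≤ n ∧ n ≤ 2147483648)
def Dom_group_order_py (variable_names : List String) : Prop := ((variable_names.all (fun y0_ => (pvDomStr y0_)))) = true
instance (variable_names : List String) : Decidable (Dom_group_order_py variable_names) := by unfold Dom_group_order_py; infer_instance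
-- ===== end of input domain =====

-- B replaces A's group-by-group rescans over a shrinking unmatched pool by a one-pass
-- rank-and-bucket scheme; same return value, no side effects (objective: alternative).

-- ===== PORT A =====
-- shared module-level context (used by both Pythons)
def PRETTY_NAMES_py : PySem.Dict String String := PySem.Dict.ofList
  [("elevation", "Elevation"),
   ("temperature_mean", "Temperature (mean)"),
   ("temperature_range", "Temperature (range)"),
   ("precipitation_mean", "Precipitation (mean)"),
   ("precipitation_range", "Precipitation (range)"),
   ("water_fraction", "Water fraction"),
   ("urban_fraction", "Urban fraction"),
   ("ndvi_mean", "NDVI (mean)"),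
   ("ndvi_range", "NDVI (range)")]

-- hand port of str.title(): exact on the ASCII domain, where Python's "cased" = A-Z/a-z
-- (a letter is uppercased after a non-letter, lowercased after a letter; others unchanged)
def pvTitleChars : List Char → Bool → List Char
  | [], _ => []
  | c :: rest, prevAlpha =>
    (if c.isAlpha then (if prevAlpha then c.toLower else c.toUpper) else c) :: pvTitleChars rest c.isAlpha

def prettifyName (name : String) : String :=
  match PRETTY_NAMES_py.get? name with
  | some v => v
  | none => String.ofList (pvTitleChars (PySem.Str.replace name "_" " ").toList false)

def VARIABLE_GROUPS_py : List (String × List String) :=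
  [("Location",   ["latitude", "longitude"]),
   ("Climate",    ["temperature", "precipitation"]),
   ("Terrain",    ["elevation", "canopy"]),
   ("Surface",    ["water_fraction", "urban_fraction"]),
   ("Land Cover", ["LC:"])]

def group_order_py (variable_names : List String) : List Int :=
  let pretty := variable_names.map prettifyName
  let st := VARIABLE_GROUPS_py.foldl (fun st g =>
      (PySem.List.enumerate (variable_names.zip pretty)).foldl (fun st it =>
        if PySem.Set.contains st.1 it.1 then st
        else
          -- 'for pfx in prefixes: … break' — first matching prefix triggers the append
          match g.2.find? (fun pfx => PySem.Str.startswith it.2.1 pfx || PySem.Str.startswith it.2.2 pfx) with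
          | some _ => (PySem.Set.add st.1 it.1, st.2 ++ [it.1])
          | none => st) st)
    ((PySem.Set.empty : PySem.Set Int), ([] : List Int))
  (PySem.List.pyRange 0 (variable_names.length : Int) 1).foldl
    (fun ord idx => if PySem.Set.contains st.1 idx then ord else ord ++ [idx]) st.2

-- ===== PORT B =====
-- _rank's loop over VARIABLE_GROUPS with an early return, as structural recursion
def rankGo (raw pn : String) : List (String × List String) → Nat
  | [] => 0
  | g :: gs =>
    if g.2.any (fun pfx => PySem.Str.startswith raw pfx || PySem.Str.startswith pn pfx) then 0
    else rankGo raw pn gs + 1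

def rankOf (raw : String) : Nat := rankGo raw (prettifyName raw) VARIABLE_GROUPS_py

def group_order_py_alt (variable_names : List String) : List Int :=
  let buckets : List (List Int) := (List.range (VARIABLE_GROUPS_py.length + 1)).map (fun _ => [])
  let buckets := (PySem.List.enumerate variable_names).foldl
    (fun bs it => bs.set (rankOf it.2) (bs.getD (rankOf it.2) [] ++ [it.1])) buckets
  buckets.flatten

-- ===== PRECONDITION & SPEC =====
def Spec_group_order_py (variable_names : List String) (out : List Int) : Prop := out = group_order_py_alt variable_names
instance (variable_names : List String) (out : List Int) : Decidable (Spec_group_order_py variable_names out) := by unfold Spec_group_order_py; infer_instance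

-- ===== CLAIM (what is proved, stated in full; the proofs are below) =====
def Claim_equal_group_order_py : Prop := ∀ (variable_names : List String), Dom_group_order_py variable_names → Spec_group_order_py variable_names (group_order_py variable_names)

-- ===== LEMMAS AND PROOFS =====

-- "some prefix of the group matches raw or pretty"
def gm (prefixes : List String) (rp : String × String) : Bool :=
  prefixes.any (fun pfx => PySem.Str.startswith rp.1 pfx || PySem.Str.startswith rp.2 pfx)

lemma contains_add (s : PySem.Set Int) (a x : Int) :
    (s.add a).contains x = (s.contains x || x == a) := by
  apply Bool.eq_iff_iff.mpr
  simp [PySem.Set.contains, PySem.Set.mem_add]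

lemma contains_empty (x : Int) : (PySem.Set.empty : PySem.Set Int).contains x = false := by
  simp [PySem.Set.contains, PySem.Set.empty]

lemma items_expand (f : String → String) (names : List String) :
    ∀ s : Int, PySem.List.enumerate (names.zip (names.map f)) s
      = (PySem.List.enumerate names s).map (fun it => (it.1, it.2, f it.2)) := by
  induction names with
  | nil => intro s; simp [PySem.List.enumerate]
  | cons x xs ih => intro s; simp [PySem.List.enumerate_cons, ih]

lemma any_key2 (p q : Int × String × String → Bool) :
    ∀ (items : List (Int × String × String)), (items.map (·.1)).Nodup →
      ∀ it ∈ items, items.any (fun it' => (it'.1 == it.1 && p it') && q it') = (p it && q it) := by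
  intro items
  induction items with
  | nil => intro _ it h; simp at h
  | cons a rest ih =>
    intro hnd it hmem
    simp only [List.map_cons, List.nodup_cons] at hnd
    rcases List.mem_cons.mp hmem with h | h
    · subst h
      have hrest : rest.any (fun it' => (it'.1 == it.1 && p it') && q it') = false := by
        simp only [List.any_eq_false]
        intro it' hit'
        have hne : it'.1 ≠ it.1 := by
          intro he; exact hnd.1 (he ▸ List.mem_map_of_mem hit')
        simp [hne]
      simp [List.any_cons, hrest]
    · have hne : a.1 ≠ it.1 := by
        intro he
        exact hnd.1 (he ▸ List.mem_map_of_mem h)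
      simp [List.any_cons, hne, ih hnd.2 it h]

lemma pass_spec (prefixes : List String) :
    ∀ (items : List (Int × String × String)) (used : PySem.Set Int) (ord : List Int)
      (f : Int × String × String → Bool),
      (items.map (·.1)).Nodup →
      (∀ it ∈ items, PySem.Set.contains used it.1 = f it) →
      (items.foldl (fun st it =>
          if PySem.Set.contains st.1 it.1 then st
          else
            match prefixes.find? (fun pfx => PySem.Str.startswith it.2.1 pfx || PySem.Str.startswith it.2.2 pfx) with
            | some _ => (PySem.Set.add st.1 it.1, st.2 ++ [it.1])
            | none => st) (used, ord)).2
        = ord ++ (items.filter (fun it => !f it && gm prefixes it.2)).map (·.1)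
      ∧ ∀ x : Int, PySem.Set.contains
          (items.foldl (fun st it =>
            if PySem.Set.contains st.1 it.1 then st
            else
              match prefixes.find? (fun pfx => PySem.Str.startswith it.2.1 pfx || PySem.Str.startswith it.2.2 pfx) with
              | some _ => (PySem.Set.add st.1 it.1, st.2 ++ [it.1])
              | none => st) (used, ord)).1 x
          = (PySem.Set.contains used x || items.any (fun it => it.1 == x && !f it && gm prefixes it.2)) := by
  intro items
  induction items with
  | nil => intro used ord f _ _; simp
  | cons a rest ih =>
    intro used ord f hnd hf
    set step := (fun (st : PySem.Set Int × List Int) (it : Int × String × String) =>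
        if PySem.Set.contains st.1 it.1 then st
        else
          match prefixes.find? (fun pfx => PySem.Str.startswith it.2.1 pfx || PySem.Str.startswith it.2.2 pfx) with
          | some _ => (PySem.Set.add st.1 it.1, st.2 ++ [it.1])
          | none => st) with hstep
    simp only [List.map_cons, List.nodup_cons] at hnd
    have hfa : PySem.Set.contains used a.1 = f a := hf a (List.mem_cons_self)
    have hfrest : ∀ it ∈ rest, PySem.Set.contains used it.1 = f it :=
      fun it h => hf it (List.mem_cons_of_mem _ h)
    rw [List.foldl_cons]
    cases hc : f a with
    | true =>
      have hhead : step (used, ord) a = (used, ord) := by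
        simp only [hstep]
        rw [if_pos (show PySem.Set.contains used a.1 = true from hfa.trans hc)]
      rw [hhead]
      obtain ⟨h1, h2⟩ := ih used ord f hnd.2 hfrest
      refine ⟨?_, ?_⟩
      · rw [h1]; simp [List.filter_cons, hc]
      · intro x; rw [h2 x]; simp [List.any_cons, hc]
    | false =>
      cases hfind : prefixes.find? (fun pfx => PySem.Str.startswith a.2.1 pfx || PySem.Str.startswith a.2.2 pfx) with
      | none =>
        have hgm : gm prefixes a.2 = false := by
          simp only [gm, List.any_eq_false]
          intro pfx hp
          simpa using List.find?_eq_none.mp hfind pfx hp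
        have hhead : step (used, ord) a = (used, ord) := by
          simp only [hstep]
          rw [if_neg (show ¬PySem.Set.contains used a.1 = true from by rw [hfa, hc]; simp), hfind]
        rw [hhead]
        obtain ⟨h1, h2⟩ := ih used ord f hnd.2 hfrest
        refine ⟨?_, ?_⟩
        · rw [h1]; simp [List.filter_cons, hgm]
        · intro x; rw [h2 x]; simp [List.any_cons, hgm]
      | some w =>
        have hgm : gm prefixes a.2 = true := by
          have hw := List.find?_some (p := fun pfx => PySem.Str.startswith a.2.1 pfx || PySem.Str.startswith a.2.2 pfx) hfind
          simp only [gm, List.any_eq_true]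
          exact ⟨w, List.mem_of_find?_eq_some hfind, hw⟩
        have hhead : step (used, ord) a = (PySem.Set.add used a.1, ord ++ [a.1]) := by
          simp only [hstep]
          rw [if_neg (show ¬PySem.Set.contains used a.1 = true from by rw [hfa, hc]; simp), hfind]
        rw [hhead]
        have hfrest' : ∀ it ∈ rest, PySem.Set.contains (PySem.Set.add used a.1) it.1
            = (f it || (it.1 == a.1)) := by
          intro it h
          rw [contains_add, hfrest it h]
        obtain ⟨h1, h2⟩ := ih (PySem.Set.add used a.1) (ord ++ [a.1])
          (fun it => f it || (it.1 == a.1)) hnd.2 hfrest'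
        have hfilt : rest.filter (fun it => !(f it || (it.1 == a.1)) && gm prefixes it.2)
            = rest.filter (fun it => !f it && gm prefixes it.2) := by
          apply List.filter_congr
          intro it h
          have hne : it.1 ≠ a.1 := by
            intro he; exact hnd.1 (he ▸ List.mem_map_of_mem h)
          have hb : (it.1 == a.1) = false := by simp [hne]
          simp [hb]
        refine ⟨?_, ?_⟩
        · rw [h1, hfilt]
          simp [List.filter_cons, hc, hgm]
        · intro x
          rw [h2 x, contains_add]
          by_cases hx : a.1 = x
          · subst hx
            have hrest0 : rest.any (fun it => it.1 == a.1 && !f it && gm prefixes it.2) = false := by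
              simp only [List.any_eq_false]
              intro it h
              have hne : it.1 ≠ a.1 := by
                intro he; exact hnd.1 (he ▸ List.mem_map_of_mem h)
              simp [hne]
            have hrest0' : rest.any (fun it => it.1 == a.1 && !(f it || (it.1 == a.1)) && gm prefixes it.2) = false := by
              simp only [List.any_eq_false]
              intro it h
              have hne : it.1 ≠ a.1 := by
                intro he; exact hnd.1 (he ▸ List.mem_map_of_mem h)
              simp [hne]
            simp [List.any_cons, hrest0, hrest0', hc, hgm]
          · have hcong : rest.any (fun it => it.1 == x && !(f it || (it.1 == a.1)) && gm prefixes it.2)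
                = rest.any (fun it => it.1 == x && !f it && gm prefixes it.2) := by
              apply Bool.eq_iff_iff.mpr
              simp only [List.any_eq_true]
              constructor
              · rintro ⟨it, h, hp⟩
                refine ⟨it, h, ?_⟩
                revert hp
                cases hfi : f it <;> cases hii : (it.1 == a.1) <;> simp
              · rintro ⟨it, h, hp⟩
                refine ⟨it, h, ?_⟩
                have hne : it.1 ≠ a.1 := by
                  intro he; exact hnd.1 (he ▸ List.mem_map_of_mem h)
                revert hp; simp [hne]
            rw [hcong]
            have hax : (a.1 == x) = false := by simp [hx]
            have hxa : (x == a.1) = false := by simp [Ne.symm hx]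
            simp [List.any_cons, hax, hxa]

def chunks : List (String × List String) → ((Int × String × String) → Bool) → List (Int × String × String) → List Int
  | [], _, _ => []
  | g :: gs, f, items =>
    (items.filter (fun it => !f it && gm g.2 it.2)).map (·.1)
      ++ chunks gs (fun it => f it || gm g.2 it.2) items

lemma passes_spec :
    ∀ (groups : List (String × List String)) (items : List (Int × String × String))
      (used : PySem.Set Int) (ord : List Int) (f : Int × String × String → Bool),
      (items.map (·.1)).Nodup →
      (∀ it ∈ items, PySem.Set.contains used it.1 = f it) →
      (groups.foldl (fun st g =>
          items.foldl (fun st it =>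
            if PySem.Set.contains st.1 it.1 then st
            else
              match g.2.find? (fun pfx => PySem.Str.startswith it.2.1 pfx || PySem.Str.startswith it.2.2 pfx) with
              | some _ => (PySem.Set.add st.1 it.1, st.2 ++ [it.1])
              | none => st) st) (used, ord)).2
        = ord ++ chunks groups f items
      ∧ ∀ x : Int, PySem.Set.contains
          (groups.foldl (fun st g =>
            items.foldl (fun st it =>
              if PySem.Set.contains st.1 it.1 then st
              else
                match g.2.find? (fun pfx => PySem.Str.startswith it.2.1 pfx || PySem.Str.startswith it.2.2 pfx) with
                | some _ => (PySem.Set.add st.1 it.1, st.2 ++ [it.1])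
                | none => st) st) (used, ord)).1 x
          = (PySem.Set.contains used x
              || items.any (fun it => it.1 == x && !f it && groups.any (fun g => gm g.2 it.2))) := by
  intro groups
  induction groups with
  | nil => intro items used ord f _ _; simp [chunks]
  | cons g gs ih =>
    intro items used ord f hnd hf
    simp only [List.foldl_cons]
    obtain ⟨p1, p2⟩ := pass_spec g.2 items used ord f hnd hf
    have hf' : ∀ it ∈ items, PySem.Set.contains
        (items.foldl (fun st it =>
          if PySem.Set.contains st.1 it.1 then st
          else
            match g.2.find? (fun pfx => PySem.Str.startswith it.2.1 pfx || PySem.Str.startswith it.2.2 pfx) with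
            | some _ => (PySem.Set.add st.1 it.1, st.2 ++ [it.1])
            | none => st) (used, ord)).1 it.1
        = (f it || gm g.2 it.2) := by
      intro it h
      rw [p2 it.1, hf it h, any_key2 (fun it' => !f it') (fun it' => gm g.2 it'.2) items hnd it h]
      cases hfi : f it <;> simp
    obtain ⟨q1, q2⟩ := ih items
      (items.foldl (fun st it =>
        if PySem.Set.contains st.1 it.1 then st
        else
          match g.2.find? (fun pfx => PySem.Str.startswith it.2.1 pfx || PySem.Str.startswith it.2.2 pfx) with
          | some _ => (PySem.Set.add st.1 it.1, st.2 ++ [it.1])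
          | none => st) (used, ord)).1
      (items.foldl (fun st it =>
        if PySem.Set.contains st.1 it.1 then st
        else
          match g.2.find? (fun pfx => PySem.Str.startswith it.2.1 pfx || PySem.Str.startswith it.2.2 pfx) with
          | some _ => (PySem.Set.add st.1 it.1, st.2 ++ [it.1])
          | none => st) (used, ord)).2
      (fun it => f it || gm g.2 it.2) hnd hf'
    refine ⟨?_, ?_⟩
    · rw [show ∀ st : PySem.Set Int × List Int, (st.1, st.2) = st from fun st => rfl] at q1
      rw [q1, p1, chunks, List.append_assoc]
    · intro x
      rw [show ∀ st : PySem.Set Int × List Int, (st.1, st.2) = st from fun st => rfl] at q2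
      rw [q2 x, p2 x, Bool.or_assoc]
      congr 1
      apply Bool.eq_iff_iff.mpr
      simp only [List.any_eq_true, Bool.or_eq_true, Bool.and_eq_true, Bool.not_or,
        Bool.not_eq_true', beq_iff_eq]
      constructor
      · rintro (⟨it, h, ⟨hx, hfi⟩, hg⟩ | ⟨it, h, ⟨hx, hf1, hg1⟩, g', hg', hgm'⟩)
        · exact ⟨it, h, ⟨hx, hfi⟩, g, List.mem_cons_self, hg⟩
        · exact ⟨it, h, ⟨hx, hf1⟩, g', List.mem_cons_of_mem _ hg', hgm'⟩
      · rintro ⟨it, h, ⟨hx, hfi⟩, g', hg', hgm'⟩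
        rcases List.mem_cons.mp hg' with rfl | hmem
        · exact Or.inl ⟨it, h, ⟨hx, hfi⟩, hgm'⟩
        · cases hgm : gm g.2 it.2 with
          | true => exact Or.inl ⟨it, h, ⟨hx, hfi⟩, hgm⟩
          | false => exact Or.inr ⟨it, h, ⟨hx, hfi, hgm⟩, g', hmem, hgm'⟩

lemma rankGo_cons (raw pn : String) (g : String × List String) (gs : List (String × List String)) :
    rankGo raw pn (g :: gs) = if gm g.2 (raw, pn) then 0 else rankGo raw pn gs + 1 := rfl

lemma chunks_rank :
    ∀ (gs : List (String × List String)) (f : (Int × String × String) → Bool)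
      (items : List (Int × String × String)),
      chunks gs f items
        = (List.range gs.length).flatMap
            (fun r => (items.filter (fun it => !f it && (rankGo it.2.1 it.2.2 gs == r))).map (·.1)) := by
  intro gs
  induction gs with
  | nil => intro f items; simp [chunks]
  | cons g gs ih =>
    intro f items
    rw [chunks, ih]
    rw [List.length_cons, List.range_succ_eq_map]
    rw [List.flatMap_cons, List.flatMap_map]
    congr 1
    · apply congrArg
      apply List.filter_congr
      intro it _
      rw [rankGo_cons]
      cases hm : gm g.2 it.2 <;> simp [hm]
    · apply List.flatMap_congr
      intro r _
      apply congrArg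
      apply List.filter_congr
      intro it _
      rw [rankGo_cons]
      cases hm : gm g.2 it.2 <;> cases hf : f it <;> simp [hm, hf]

lemma rankGo_not_any (raw pn : String) :
    ∀ gs : List (String × List String),
      (!gs.any (fun g => gm g.2 (raw, pn))) = (rankGo raw pn gs == gs.length) := by
  intro gs
  induction gs with
  | nil => simp [rankGo]
  | cons g gs ih =>
    rw [List.any_cons, rankGo_cons]
    cases hm : gm g.2 (raw, pn) with
    | true =>
      simp only [hm, Bool.true_or, Bool.not_true, if_true]
      simp [List.length_cons]
    | false =>
      simp only [hm, Bool.false_or, if_false]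
      rw [ih]
      simp [List.length_cons]

-- bucket-fill characterisation for B
lemma rankGo_le (raw pn : String) : ∀ gs : List (String × List String), rankGo raw pn gs ≤ gs.length := by
  intro gs
  induction gs with
  | nil => simp [rankGo]
  | cons g gs ih =>
    rw [rankGo_cons]
    split_ifs <;> simp [ih, Nat.succ_le_succ]

lemma rankOf_le (raw : String) : rankOf raw ≤ 5 := rankGo_le raw (prettifyName raw) VARIABLE_GROUPS_py

def Fr (r : Nat) (items : List (Int × String)) : List Int :=
  (items.filter (fun it => rankOf it.2 == r)).map (·.1)

lemma buckets_spec :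
    ∀ (items : List (Int × String)) (a b c d e f : List Int),
      items.foldl (fun bs it => bs.set (rankOf it.2) (bs.getD (rankOf it.2) [] ++ [it.1])) [a, b, c, d, e, f]
        = [a ++ Fr 0 items, b ++ Fr 1 items, c ++ Fr 2 items, d ++ Fr 3 items, e ++ Fr 4 items, f ++ Fr 5 items] := by
  intro items
  induction items with
  | nil => intro a b c d e f; simp [Fr]
  | cons hd tl ih =>
    intro a b c d e f
    set stepB := (fun (bs : List (List Int)) (it : Int × String) =>
        bs.set (rankOf it.2) (bs.getD (rankOf it.2) [] ++ [it.1])) with hstepB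
    rw [List.foldl_cons]
    have h5 : rankOf hd.2 ≤ 5 := rankOf_le hd.2
    have hcases : rankOf hd.2 = 0 ∨ rankOf hd.2 = 1 ∨ rankOf hd.2 = 2 ∨ rankOf hd.2 = 3 ∨
        rankOf hd.2 = 4 ∨ rankOf hd.2 = 5 := by omega
    rcases hcases with h | h | h | h | h | h <;>
      [ (have hh : stepB [a, b, c, d, e, f] hd = [a ++ [hd.1], b, c, d, e, f] := by rw [hstepB]; simp [h]);
        (have hh : stepB [a, b, c, d, e, f] hd = [a, b ++ [hd.1], c, d, e, f] := by rw [hstepB]; simp [h]);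
        (have hh : stepB [a, b, c, d, e, f] hd = [a, b, c ++ [hd.1], d, e, f] := by rw [hstepB]; simp [h]);
        (have hh : stepB [a, b, c, d, e, f] hd = [a, b, c, d ++ [hd.1], e, f] := by rw [hstepB]; simp [h]);
        (have hh : stepB [a, b, c, d, e, f] hd = [a, b, c, d, e ++ [hd.1], f] := by rw [hstepB]; simp [h]);
        (have hh : stepB [a, b, c, d, e, f] hd = [a, b, c, d, e, f ++ [hd.1]] := by rw [hstepB]; simp [h])] <;>
      rw [hh, ih] <;>
      simp [Fr, List.filter_cons, h, List.append_assoc, List.singleton_append]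

def canonical (names : List String) : List Int :=
  Fr 0 (PySem.List.enumerate names) ++ Fr 1 (PySem.List.enumerate names)
    ++ Fr 2 (PySem.List.enumerate names) ++ Fr 3 (PySem.List.enumerate names)
    ++ Fr 4 (PySem.List.enumerate names) ++ Fr 5 (PySem.List.enumerate names)

lemma alt_eq_canonical (names : List String) : group_order_py_alt names = canonical names := by
  unfold group_order_py_alt
  show ((PySem.List.enumerate names).foldl
      (fun bs it => bs.set (rankOf it.2) (bs.getD (rankOf it.2) [] ++ [it.1]))
      [[], [], [], [], [], []]).flatten = canonical names
  rw [buckets_spec]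
  simp [canonical, List.flatten]

lemma final_loop (s : PySem.Set Int) (ord : List Int) (n : Int) :
    (PySem.List.pyRange 0 n 1).foldl
      (fun ord idx => if PySem.Set.contains s idx then ord else ord ++ [idx]) ord
    = ord ++ (PySem.List.pyRange 0 n 1).filter (fun idx => !PySem.Set.contains s idx) := by
  have hswap : (fun (o : List Int) (idx : Int) => if PySem.Set.contains s idx then o else o ++ [idx])
      = fun o idx => if (!PySem.Set.contains s idx) = true then o ++ [idx] else o := by
    funext o idx; cases hc : PySem.Set.contains s idx <;> simp [hc]
  rw [hswap, PySem.List.foldl_append_if_eq_filter]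

lemma a_eq_canonical (names : List String) : group_order_py names = canonical names := by
  unfold group_order_py
  show (PySem.List.pyRange 0 (names.length : Int) 1).foldl
      (fun ord idx => if PySem.Set.contains
        (VARIABLE_GROUPS_py.foldl (fun st g =>
          (PySem.List.enumerate (names.zip (names.map prettifyName))).foldl (fun st it =>
            if PySem.Set.contains st.1 it.1 then st
            else
              match g.2.find? (fun pfx => PySem.Str.startswith it.2.1 pfx || PySem.Str.startswith it.2.2 pfx) with
              | some _ => (PySem.Set.add st.1 it.1, st.2 ++ [it.1])
              | none => st) st)
          ((PySem.Set.empty : PySem.Set Int), ([] : List Int))).1 idx then ord else ord ++ [idx])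
      (VARIABLE_GROUPS_py.foldl (fun st g =>
          (PySem.List.enumerate (names.zip (names.map prettifyName))).foldl (fun st it =>
            if PySem.Set.contains st.1 it.1 then st
            else
              match g.2.find? (fun pfx => PySem.Str.startswith it.2.1 pfx || PySem.Str.startswith it.2.2 pfx) with
              | some _ => (PySem.Set.add st.1 it.1, st.2 ++ [it.1])
              | none => st) st)
          ((PySem.Set.empty : PySem.Set Int), ([] : List Int))).2
    = canonical names
  have hnd : ((PySem.List.enumerate (names.zip (names.map prettifyName))).map (·.1)).Nodup := by
    rw [PySem.List.map_fst_enumerate]; exact PySem.List.nodup_pyRange_one _ _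
  have hf : ∀ it ∈ PySem.List.enumerate (names.zip (names.map prettifyName)),
      PySem.Set.contains (PySem.Set.empty : PySem.Set Int) it.1 = (fun _ => false) it := by
    intro it _; simp [contains_empty]
  obtain ⟨h1, h2⟩ := passes_spec VARIABLE_GROUPS_py
    (PySem.List.enumerate (names.zip (names.map prettifyName)))
    (PySem.Set.empty : PySem.Set Int) [] (fun _ => false) hnd hf
  rw [final_loop, h1]
  have hrange : PySem.List.pyRange 0 (names.length : Int) 1
      = (PySem.List.enumerate (names.zip (names.map prettifyName))).map (·.1) := by
    rw [PySem.List.map_fst_enumerate]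
    simp [List.length_zip]
  rw [hrange, List.filter_map]
  have hpt : ∀ it ∈ PySem.List.enumerate (names.zip (names.map prettifyName)),
      ((fun idx => !PySem.Set.contains (VARIABLE_GROUPS_py.foldl (fun st g =>
          (PySem.List.enumerate (names.zip (names.map prettifyName))).foldl (fun st it =>
            if PySem.Set.contains st.1 it.1 then st
            else
              match g.2.find? (fun pfx => PySem.Str.startswith it.2.1 pfx || PySem.Str.startswith it.2.2 pfx) with
              | some _ => (PySem.Set.add st.1 it.1, st.2 ++ [it.1])
              | none => st) st)
          ((PySem.Set.empty : PySem.Set Int), ([] : List Int))).1 idx) ∘ (·.1)) it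
        = (!(VARIABLE_GROUPS_py.any (fun g => gm g.2 it.2))) := by
    intro it hmem
    show (!PySem.Set.contains (VARIABLE_GROUPS_py.foldl (fun st g =>
          (PySem.List.enumerate (names.zip (names.map prettifyName))).foldl (fun st it =>
            if PySem.Set.contains st.1 it.1 then st
            else
              match g.2.find? (fun pfx => PySem.Str.startswith it.2.1 pfx || PySem.Str.startswith it.2.2 pfx) with
              | some _ => (PySem.Set.add st.1 it.1, st.2 ++ [it.1])
              | none => st) st)
          ((PySem.Set.empty : PySem.Set Int), ([] : List Int))).1 it.1) = _
    rw [h2 it.1, contains_empty]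
    simp only [Bool.false_or]
    rw [any_key2 (fun y => !((fun (_ : Int × String × String) => false) y))
      (fun it' => VARIABLE_GROUPS_py.any (fun g => gm g.2 it'.2))
      (PySem.List.enumerate (names.zip (names.map prettifyName))) hnd it hmem]
    simp
  rw [List.filter_congr hpt]
  rw [chunks_rank]
  rw [show VARIABLE_GROUPS_py.length = 5 from rfl]
  rw [show List.range 5 = [0, 1, 2, 3, 4] from rfl]
  rw [items_expand prettifyName names 0]
  simp only [List.flatMap_cons, List.flatMap_nil, List.append_nil, List.filter_map,
    List.map_map, List.nil_append]
  simp only [Function.comp_def]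
  simp [canonical, Fr, rankOf, rankGo_not_any, VARIABLE_GROUPS_py, List.append_assoc]
  apply congrArg
  apply List.filter_congr
  intro it _
  have h := rankGo_not_any it.2 (prettifyName it.2) VARIABLE_GROUPS_py
  simpa [VARIABLE_GROUPS_py] using h

-- ===== VERDICT (by name: the statement is the Claim_ definition above) =====
theorem group_order_py_spec : Claim_equal_group_order_py := by
  intro names _
  unfold Spec_group_order_py
  rw [a_eq_canonical, alt_eq_canonical]
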